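-- pv_equiv track=rewrite | github.com/ioaksenenko/neural_networks | utilities/datamaker/main.py | single_choice_question_generate
-- ===== SOURCE A (Python) =====
-- def single_choice_question_generate(n=1, is_item=True):
--     inputs = []
--     outputs = []
--     for i in range(n):
--         input = ['<p>', '_', '</p>']
--         output = ['scq_4', 'scq_1', 'scq_4']
--         for j in range(n):
--             input += ['<p>', str(j+1), '.', ('=' if i == j else '~') + '_', ';', '</p>']
--             output += ['scq_4', 'scq_3', 'scq_3', 'scq_2,' + str(j+5), 'scq_3', 'scq_4'] if j < 3 else ['scq_4', 'scq_0', 'scq_0', 'scq_2,' + str(j+5), 'scq_0', 'scq_4']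
--         input += ['<p>', '_', '</p>']
--         output += ['scq_4', 'scq_1', 'scq_4']
--         inputs.append(input)
--         outputs.append(output)
--     return inputs, outputs
-- ===== SOURCE B (Python) =====
-- def single_choice_question_generate(n=1, is_item=True):
--     # Positional (table) formulation: every row has m = 6*n + 6 tokens; the
--     # token at position k is computed directly from k by index arithmetic
--     # (head, item number k//6 with sub-position k%6, tail) instead of being
--     # accumulated by nested append loops.
--     m = 6 * n + 6
--
--     def in_tok(i, k):
--         if k < 3 or k >= m - 3:
--             return ('<p>', '_', '</p>')[k % 3]
--         j, r = divmod(k - 3, 6)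
--         return ('<p>', str(j + 1), '.',
--                 ('=' if i == j else '~') + '_', ';', '</p>')[r]
--
--     def out_tok(k):
--         if k < 3 or k >= m - 3:
--             return ('scq_4', 'scq_1', 'scq_4')[k % 3]
--         j, r = divmod(k - 3, 6)
--         t = 'scq_3' if j < 3 else 'scq_0'
--         return ('scq_4', t, t, 'scq_2,' + str(j + 5), t, 'scq_4')[r]
--
--     return ([[in_tok(i, k) for k in range(m)] for i in range(n)],
--             [[out_tok(k) for k in range(m)] for _ in range(n)])
-- ===== Notes on version B (the rewrite author's own statement) =====
-- stated objective: alternative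
-- what changed: B replaces A's nested append loops by a positional (table) formulation: each row has 6n+6 slots and the token at slot k is computed directly from k by index arithmetic (divmod into item number and sub-position), so rows are comprehensions over positions instead of lists accumulated chunk by chunk.
import Mathlib
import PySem

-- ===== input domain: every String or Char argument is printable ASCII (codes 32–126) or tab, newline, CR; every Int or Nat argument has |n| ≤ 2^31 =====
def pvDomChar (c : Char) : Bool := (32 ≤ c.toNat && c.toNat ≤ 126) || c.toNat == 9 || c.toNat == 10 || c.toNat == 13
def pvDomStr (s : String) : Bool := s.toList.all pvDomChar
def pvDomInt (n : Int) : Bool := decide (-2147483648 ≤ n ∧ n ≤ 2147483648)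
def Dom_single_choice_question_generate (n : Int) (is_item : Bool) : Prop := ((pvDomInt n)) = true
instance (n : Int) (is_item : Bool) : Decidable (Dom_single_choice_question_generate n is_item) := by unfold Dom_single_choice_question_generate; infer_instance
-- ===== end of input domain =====

-- B replaces A's nested append loops by a positional (table) formulation: each row has 6n+6 slots and
-- the token at slot k is computed directly from k by index arithmetic (divmod). Objective: alternative.

-- ===== PORT A =====
def single_choice_question_generate (n : Int) (is_item : Bool) : List (List String) × List (List String) :=
  (PySem.List.pyRange 0 n 1).foldl (fun s i =>
    let inner := (PySem.List.pyRange 0 n 1).foldl (fun t j =>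
      (t.1 ++ ["<p>", PySem.Int.toStr (j+1), ".", (if i == j then "=" else "~") ++ "_", ";", "</p>"],
       t.2 ++ (if j < 3 then
           ["scq_4", "scq_3", "scq_3", "scq_2," ++ PySem.Int.toStr (j+5), "scq_3", "scq_4"]
         else
           ["scq_4", "scq_0", "scq_0", "scq_2," ++ PySem.Int.toStr (j+5), "scq_0", "scq_4"])))
      (["<p>", "_", "</p>"], ["scq_4", "scq_1", "scq_4"])
    (s.1 ++ [inner.1 ++ ["<p>", "_", "</p>"]], s.2 ++ [inner.2 ++ ["scq_4", "scq_1", "scq_4"]]))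
    ([], [])

-- ===== PORT B =====
-- Python's tuple indexing (…)[e] is ported as pyGetD with default "": here the indices
-- k % 3 ∈ [0,3) and r = (k-3) % 6 ∈ [0,6) are always in range, so pyGetD is exact.
def scqInTok (n i k : Int) : String :=
  if k < 3 ∨ 6*n + 6 - 3 ≤ k then
    PySem.List.pyGetD ["<p>", "_", "</p>"] (PySem.Int.mod k 3) ""
  else
    let j := PySem.Int.floordiv (k - 3) 6
    let r := PySem.Int.mod (k - 3) 6
    PySem.List.pyGetD ["<p>", PySem.Int.toStr (j+1), ".", (if i == j then "=" else "~") ++ "_", ";", "</p>"] r ""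

def scqOutTok (n k : Int) : String :=
  if k < 3 ∨ 6*n + 6 - 3 ≤ k then
    PySem.List.pyGetD ["scq_4", "scq_1", "scq_4"] (PySem.Int.mod k 3) ""
  else
    let j := PySem.Int.floordiv (k - 3) 6
    let r := PySem.Int.mod (k - 3) 6
    let t := if j < 3 then "scq_3" else "scq_0"
    PySem.List.pyGetD ["scq_4", t, t, "scq_2," ++ PySem.Int.toStr (j+5), t, "scq_4"] r ""

def single_choice_question_generate_alt (n : Int) (is_item : Bool) : List (List String) × List (List String) :=
  ((PySem.List.pyRange 0 n 1).map (fun i => (PySem.List.pyRange 0 (6*n+6) 1).map (scqInTok n i)),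
   (PySem.List.pyRange 0 n 1).map (fun _ => (PySem.List.pyRange 0 (6*n+6) 1).map (scqOutTok n)))

-- ===== PRECONDITION & SPEC =====
def Spec_single_choice_question_generate (n : Int) (is_item : Bool) (out : List (List String) × List (List String)) : Prop := out = single_choice_question_generate_alt n is_item
instance (n : Int) (is_item : Bool) (out : List (List String) × List (List String)) : Decidable (Spec_single_choice_question_generate n is_item out) := by unfold Spec_single_choice_question_generate; infer_instance

-- ===== CLAIM (what is proved, stated in full; the proofs are below) =====
def Claim_equal_single_choice_question_generate : Prop := ∀ (n : Int) (is_item : Bool), Dom_single_choice_question_generate n is_item → Spec_single_choice_question_generate n is_item (single_choice_question_generate n is_item)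

-- ===== LEMMAS AND PROOFS =====

-- explicit expansions of short ranges (explicit endpoints keep rw from matching other ranges)
theorem scq_pyRange_six (a : Int) : PySem.List.pyRange a (a+6) 1 = [a, a+1, a+2, a+3, a+4, a+5] := by
  rw [PySem.List.pyRange_one]
  norm_num [show Int.toNat 6 = 6 from rfl, List.range_succ]

theorem scq_pyRange_three (a : Int) : PySem.List.pyRange a (a+3) 1 = [a, a+1, a+2] := by
  rw [PySem.List.pyRange_one]
  norm_num [show Int.toNat 3 = 3 from rfl, List.range_succ]

-- A's inner pair-fold of two appended chunks splits into two flatMaps.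
theorem scq_inner_split (i : Int) (l : List Int) (a b : List String) :
    List.foldl (fun (t : List String × List String) j =>
      (t.1 ++ ["<p>", PySem.Int.toStr (j+1), ".", (if i == j then "=" else "~") ++ "_", ";", "</p>"],
       t.2 ++ (if j < 3 then
           ["scq_4", "scq_3", "scq_3", "scq_2," ++ PySem.Int.toStr (j+5), "scq_3", "scq_4"]
         else
           ["scq_4", "scq_0", "scq_0", "scq_2," ++ PySem.Int.toStr (j+5), "scq_0", "scq_4"]))) (a, b) l
    = (a ++ l.flatMap (fun j => ["<p>", PySem.Int.toStr (j+1), ".", (if i == j then "=" else "~") ++ "_", ";", "</p>"]),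
       b ++ l.flatMap (fun j => if j < 3 then
           ["scq_4", "scq_3", "scq_3", "scq_2," ++ PySem.Int.toStr (j+5), "scq_3", "scq_4"]
         else
           ["scq_4", "scq_0", "scq_0", "scq_2," ++ PySem.Int.toStr (j+5), "scq_0", "scq_4"])) := by
  induction l generalizing a b with
  | nil => simp
  | cons x xs ih =>
    rw [List.foldl_cons]
    exact (ih _ _).trans (by simp [List.flatMap_cons, List.append_assoc])

-- A's outer pair-fold of two appended singletons splits into two maps.
theorem scq_outer_split (fI fO : Int → List String) (l : List Int) (a b : List (List String)) :
    List.foldl (fun (s : List (List String) × List (List String)) i =>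
      (s.1 ++ [fI i], s.2 ++ [fO i])) (a, b) l = (a ++ l.map fI, b ++ l.map fO) := by
  induction l generalizing a b with
  | nil => simp
  | cons x xs ih =>
    rw [List.foldl_cons]
    exact (ih _ _).trans (by simp [List.append_assoc])

-- evaluation of B's token functions in the three positional regions

theorem scqInTok_head (n i k : Int) (h0 : 0 ≤ k) (h3 : k < 3) :
    scqInTok n i k = PySem.List.pyGetD ["<p>", "_", "</p>"] k "" := by
  unfold scqInTok
  rw [if_pos (Or.inl h3)]
  congr 1
  rw [PySem.Int.mod_eq_emod_of_pos (by omega)]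
  omega

theorem scqOutTok_head (n k : Int) (h0 : 0 ≤ k) (h3 : k < 3) :
    scqOutTok n k = PySem.List.pyGetD ["scq_4", "scq_1", "scq_4"] k "" := by
  unfold scqOutTok
  rw [if_pos (Or.inl h3)]
  congr 1
  rw [PySem.Int.mod_eq_emod_of_pos (by omega)]
  omega

theorem scqInTok_tail (n i k : Int) (hn : 0 ≤ n) (h1 : 6*n+3 ≤ k) (h2 : k < 6*n+6) :
    scqInTok n i k = PySem.List.pyGetD ["<p>", "_", "</p>"] (k - (6*n+3)) "" := by
  unfold scqInTok
  rw [if_pos (Or.inr (by omega))]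
  congr 1
  rw [PySem.Int.mod_eq_emod_of_pos (by omega)]
  omega

theorem scqOutTok_tail (n k : Int) (hn : 0 ≤ n) (h1 : 6*n+3 ≤ k) (h2 : k < 6*n+6) :
    scqOutTok n k = PySem.List.pyGetD ["scq_4", "scq_1", "scq_4"] (k - (6*n+3)) "" := by
  unfold scqOutTok
  rw [if_pos (Or.inr (by omega))]
  congr 1
  rw [PySem.Int.mod_eq_emod_of_pos (by omega)]
  omega

theorem scqInTok_item (n i b k : Int) (hb : 0 ≤ b) (hbn : b < n) (h1 : 6*b+3 ≤ k) (h2 : k < 6*b+9) :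
    scqInTok n i k
    = PySem.List.pyGetD ["<p>", PySem.Int.toStr (b+1), ".", (if i == b then "=" else "~") ++ "_", ";", "</p>"] (k - (6*b+3)) "" := by
  unfold scqInTok
  rw [if_neg (by omega : ¬((k < 3) ∨ 6*n + 6 - 3 ≤ k))]
  have hq : PySem.Int.floordiv (k - 3) 6 = b :=
    (PySem.Int.floordiv_eq_iff_of_pos (by omega)).mpr (by omega)
  have hm : PySem.Int.mod (k - 3) 6 = k - (6*b+3) := by
    have h := PySem.Int.floordiv_mul_add_mod (k - 3) 6
    rw [hq] at h; omega
  simp only [hq, hm]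

theorem scqOutTok_item (n b k : Int) (hb : 0 ≤ b) (hbn : b < n) (h1 : 6*b+3 ≤ k) (h2 : k < 6*b+9) :
    scqOutTok n k
    = (let t := if b < 3 then "scq_3" else "scq_0"
       PySem.List.pyGetD ["scq_4", t, t, "scq_2," ++ PySem.Int.toStr (b+5), t, "scq_4"] (k - (6*b+3)) "") := by
  unfold scqOutTok
  rw [if_neg (by omega : ¬((k < 3) ∨ 6*n + 6 - 3 ≤ k))]
  have hq : PySem.Int.floordiv (k - 3) 6 = b :=
    (PySem.Int.floordiv_eq_iff_of_pos (by omega)).mpr (by omega)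
  have hm : PySem.Int.mod (k - 3) 6 = k - (6*b+3) := by
    have h := PySem.Int.floordiv_mul_add_mod (k - 3) 6
    rw [hq] at h; omega
  simp only [hq, hm]

-- the middle region of a row, as a flatMap over the item index

theorem scq_mid_in (n i b : Int) (hb : 0 ≤ b) :
    b ≤ n →
    (PySem.List.pyRange 3 (6*b+3) 1).map (scqInTok n i)
    = (PySem.List.pyRange 0 b 1).flatMap
        (fun j => ["<p>", PySem.Int.toStr (j+1), ".", (if i == j then "=" else "~") ++ "_", ";", "</p>"]) := by
  induction b, hb using Int.le_induction with
  | base =>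
    intro _
    rw [PySem.List.pyRange_one_eq_nil (by omega), PySem.List.pyRange_one_eq_nil (by omega)]
    simp
  | succ b hb ih =>
    intro hbn
    rw [PySem.List.pyRange_one_append 3 (6*b+3) (6*(b+1)+3) (by omega) (by omega),
        List.map_append, ih (by omega),
        show (6*(b+1)+3 : Int) = (6*b+3) + 6 by ring, scq_pyRange_six (6*b+3),
        show PySem.List.pyRange 0 (b+1) 1 = PySem.List.pyRange 0 b 1 ++ [b] from
          PySem.List.pyRange_one_succ_right (by omega)]
    have e0 : scqInTok n i (6*b+3) = "<p>" := by
      rw [scqInTok_item n i b _ hb (by omega) (by omega) (by omega),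
          show 6*b+3 - (6*b+3) = (0:Int) by ring]
      simp [PySem.List.pyGetD_ofNat']
    have e1 : scqInTok n i (6*b+3+1) = PySem.Int.toStr (b+1) := by
      rw [scqInTok_item n i b _ hb (by omega) (by omega) (by omega),
          show 6*b+3+1 - (6*b+3) = (1:Int) by ring]
      simp [PySem.List.pyGetD_ofNat']
    have e2 : scqInTok n i (6*b+3+2) = "." := by
      rw [scqInTok_item n i b _ hb (by omega) (by omega) (by omega),
          show 6*b+3+2 - (6*b+3) = (2:Int) by ring]
      simp [PySem.List.pyGetD_ofNat']
    have e3 : scqInTok n i (6*b+3+3) = (if i == b then "=" else "~") ++ "_" := by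
      rw [scqInTok_item n i b _ hb (by omega) (by omega) (by omega),
          show 6*b+3+3 - (6*b+3) = (3:Int) by ring]
      simp [PySem.List.pyGetD_ofNat']
    have e4 : scqInTok n i (6*b+3+4) = ";" := by
      rw [scqInTok_item n i b _ hb (by omega) (by omega) (by omega),
          show 6*b+3+4 - (6*b+3) = (4:Int) by ring]
      simp [PySem.List.pyGetD_ofNat']
    have e5 : scqInTok n i (6*b+3+5) = "</p>" := by
      rw [scqInTok_item n i b _ hb (by omega) (by omega) (by omega),
          show 6*b+3+5 - (6*b+3) = (5:Int) by ring]
      simp [PySem.List.pyGetD_ofNat']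
    simp [e0, e1, e2, e3, e4, e5]

theorem scq_mid_out (n b : Int) (hb : 0 ≤ b) :
    b ≤ n →
    (PySem.List.pyRange 3 (6*b+3) 1).map (scqOutTok n)
    = (PySem.List.pyRange 0 b 1).flatMap
        (fun j => if j < 3 then
            ["scq_4", "scq_3", "scq_3", "scq_2," ++ PySem.Int.toStr (j+5), "scq_3", "scq_4"]
          else
            ["scq_4", "scq_0", "scq_0", "scq_2," ++ PySem.Int.toStr (j+5), "scq_0", "scq_4"]) := by
  induction b, hb using Int.le_induction with
  | base =>
    intro _
    rw [PySem.List.pyRange_one_eq_nil (by omega), PySem.List.pyRange_one_eq_nil (by omega)]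
    simp
  | succ b hb ih =>
    intro hbn
    rw [PySem.List.pyRange_one_append 3 (6*b+3) (6*(b+1)+3) (by omega) (by omega),
        List.map_append, ih (by omega),
        show (6*(b+1)+3 : Int) = (6*b+3) + 6 by ring, scq_pyRange_six (6*b+3),
        show PySem.List.pyRange 0 (b+1) 1 = PySem.List.pyRange 0 b 1 ++ [b] from
          PySem.List.pyRange_one_succ_right (by omega)]
    have e0 : scqOutTok n (6*b+3) = "scq_4" := by
      rw [scqOutTok_item n b _ hb (by omega) (by omega) (by omega),
          show 6*b+3 - (6*b+3) = (0:Int) by ring]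
      by_cases h : b < 3 <;> simp [h, PySem.List.pyGetD_ofNat']
    have e1 : scqOutTok n (6*b+3+1) = (if b < 3 then "scq_3" else "scq_0") := by
      rw [scqOutTok_item n b _ hb (by omega) (by omega) (by omega),
          show 6*b+3+1 - (6*b+3) = (1:Int) by ring]
      by_cases h : b < 3 <;> simp [h, PySem.List.pyGetD_ofNat']
    have e2 : scqOutTok n (6*b+3+2) = (if b < 3 then "scq_3" else "scq_0") := by
      rw [scqOutTok_item n b _ hb (by omega) (by omega) (by omega),
          show 6*b+3+2 - (6*b+3) = (2:Int) by ring]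
      by_cases h : b < 3 <;> simp [h, PySem.List.pyGetD_ofNat']
    have e3 : scqOutTok n (6*b+3+3) = "scq_2," ++ PySem.Int.toStr (b+5) := by
      rw [scqOutTok_item n b _ hb (by omega) (by omega) (by omega),
          show 6*b+3+3 - (6*b+3) = (3:Int) by ring]
      by_cases h : b < 3 <;> simp [h, PySem.List.pyGetD_ofNat']
    have e4 : scqOutTok n (6*b+3+4) = (if b < 3 then "scq_3" else "scq_0") := by
      rw [scqOutTok_item n b _ hb (by omega) (by omega) (by omega),
          show 6*b+3+4 - (6*b+3) = (4:Int) by ring]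
      by_cases h : b < 3 <;> simp [h, PySem.List.pyGetD_ofNat']
    have e5 : scqOutTok n (6*b+3+5) = "scq_4" := by
      rw [scqOutTok_item n b _ hb (by omega) (by omega) (by omega),
          show 6*b+3+5 - (6*b+3) = (5:Int) by ring]
      by_cases h : b < 3 <;> simp [h, PySem.List.pyGetD_ofNat']
    simp only [List.map_cons, List.map_nil, e0, e1, e2, e3, e4, e5, List.flatMap_append,
      List.flatMap_cons, List.flatMap_nil, List.append_nil, List.append_assoc]
    by_cases h : b < 3 <;> simp [h]

-- a whole row of B equals the corresponding chunked row of A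

theorem scq_row_in (n i : Int) (hn : 0 ≤ n) :
    (PySem.List.pyRange 0 (6*n+6) 1).map (scqInTok n i)
    = ["<p>", "_", "</p>"]
      ++ (PySem.List.pyRange 0 n 1).flatMap
          (fun j => ["<p>", PySem.Int.toStr (j+1), ".", (if i == j then "=" else "~") ++ "_", ";", "</p>"])
      ++ ["<p>", "_", "</p>"] := by
  rw [PySem.List.pyRange_one_append 0 3 (6*n+6) (by omega) (by omega),
      PySem.List.pyRange_one_append 3 (6*n+3) (6*n+6) (by omega) (by omega),
      show PySem.List.pyRange 0 3 1 = [0, 1, 2] by decide,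
      show (6*n+6 : Int) = (6*n+3) + 3 by ring, scq_pyRange_three (6*n+3)]
  have h0 : scqInTok n i 0 = "<p>" := by rw [scqInTok_head n i 0 (by omega) (by omega)]; decide
  have h1 : scqInTok n i 1 = "_" := by rw [scqInTok_head n i 1 (by omega) (by omega)]; decide
  have h2 : scqInTok n i 2 = "</p>" := by rw [scqInTok_head n i 2 (by omega) (by omega)]; decide
  have t0 : scqInTok n i (6*n+3) = "<p>" := by
    rw [scqInTok_tail n i _ hn (by omega) (by omega), show 6*n+3 - (6*n+3) = (0:Int) by ring]; decide
  have t1 : scqInTok n i (6*n+3+1) = "_" := by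
    rw [scqInTok_tail n i _ hn (by omega) (by omega), show 6*n+3+1 - (6*n+3) = (1:Int) by ring]; decide
  have t2 : scqInTok n i (6*n+3+2) = "</p>" := by
    rw [scqInTok_tail n i _ hn (by omega) (by omega), show 6*n+3+2 - (6*n+3) = (2:Int) by ring]; decide
  simp [h0, h1, h2, t0, t1, t2, scq_mid_in n i n hn le_rfl]

theorem scq_row_out (n : Int) (hn : 0 ≤ n) :
    (PySem.List.pyRange 0 (6*n+6) 1).map (scqOutTok n)
    = ["scq_4", "scq_1", "scq_4"]
      ++ (PySem.List.pyRange 0 n 1).flatMap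
          (fun j => if j < 3 then
              ["scq_4", "scq_3", "scq_3", "scq_2," ++ PySem.Int.toStr (j+5), "scq_3", "scq_4"]
            else
              ["scq_4", "scq_0", "scq_0", "scq_2," ++ PySem.Int.toStr (j+5), "scq_0", "scq_4"])
      ++ ["scq_4", "scq_1", "scq_4"] := by
  rw [PySem.List.pyRange_one_append 0 3 (6*n+6) (by omega) (by omega),
      PySem.List.pyRange_one_append 3 (6*n+3) (6*n+6) (by omega) (by omega),
      show PySem.List.pyRange 0 3 1 = [0, 1, 2] by decide,
      show (6*n+6 : Int) = (6*n+3) + 3 by ring, scq_pyRange_three (6*n+3)]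
  have h0 : scqOutTok n 0 = "scq_4" := by rw [scqOutTok_head n 0 (by omega) (by omega)]; decide
  have h1 : scqOutTok n 1 = "scq_1" := by rw [scqOutTok_head n 1 (by omega) (by omega)]; decide
  have h2 : scqOutTok n 2 = "scq_4" := by rw [scqOutTok_head n 2 (by omega) (by omega)]; decide
  have t0 : scqOutTok n (6*n+3) = "scq_4" := by
    rw [scqOutTok_tail n _ hn (by omega) (by omega), show 6*n+3 - (6*n+3) = (0:Int) by ring]; decide
  have t1 : scqOutTok n (6*n+3+1) = "scq_1" := by
    rw [scqOutTok_tail n _ hn (by omega) (by omega), show 6*n+3+1 - (6*n+3) = (1:Int) by ring]; decide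
  have t2 : scqOutTok n (6*n+3+2) = "scq_4" := by
    rw [scqOutTok_tail n _ hn (by omega) (by omega), show 6*n+3+2 - (6*n+3) = (2:Int) by ring]; decide
  simp [h0, h1, h2, t0, t1, t2, scq_mid_out n n hn le_rfl]

-- ===== VERDICT (by name: the statement is the Claim_ definition above) =====
theorem single_choice_question_generate_spec : Claim_equal_single_choice_question_generate := by
  intro n _is_item _
  unfold Spec_single_choice_question_generate
  unfold single_choice_question_generate single_choice_question_generate_alt
  by_cases hn : n ≤ 0
  · rw [PySem.List.pyRange_one_eq_nil hn]; simp
  · simp only [scq_inner_split, scq_outer_split, List.nil_append]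
    refine congrArg₂ Prod.mk ?_ ?_
    · exact List.map_congr_left (fun i _ => by
        rw [scq_row_in n i (by omega)])
    · exact List.map_congr_left (fun i _ => by
        rw [scq_row_out n (by omega)])
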